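-- pv_equiv track=rewrite | github.com/pvaibhavv12/Coding | hackerrank/first.py | get_left_index
-- ===== SOURCE A (Python) =====
-- def get_left_index(string,n):
--     index = int((n-1)/2)
--     if string[index] != '0':
--         return index + 1
--     left_index = -1
--     for i in range(index):
--         if string[i] != '0':
--             left_index = i
--     return left_index
-- ===== SOURCE B (Python) =====
-- def get_left_index(string, n):
--     index = int((n - 1) / 2)
--     if string[index] != '0':
--         return index + 1
--     return len(string[:index].rstrip('0')) - 1
-- ===== Notes on version B (the rewrite author's own statement) =====
-- stated objective: simpler
-- what changed: The forward loop maintaining a running last-match accumulator is replaced by a loop-free slice computation: len(string[:index].rstrip('0')) - 1, which strips trailing zeros from the prefix and reads off the last non-zero position.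
-- intended difference: When int((n-1)/2) is negative, string[index] == '0' and the prefix string[:index] contains a non-zero character, A returns -1 because range(negative) is empty even though its own wrapped guard treated the negative index as meaningful, while B returns the index of the last non-zero character of that prefix, which is the intended 'last non-zero before the middle' value. — e.g. on get_left_index("10", -1): A returns -1, B returns 0
import Mathlib
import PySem

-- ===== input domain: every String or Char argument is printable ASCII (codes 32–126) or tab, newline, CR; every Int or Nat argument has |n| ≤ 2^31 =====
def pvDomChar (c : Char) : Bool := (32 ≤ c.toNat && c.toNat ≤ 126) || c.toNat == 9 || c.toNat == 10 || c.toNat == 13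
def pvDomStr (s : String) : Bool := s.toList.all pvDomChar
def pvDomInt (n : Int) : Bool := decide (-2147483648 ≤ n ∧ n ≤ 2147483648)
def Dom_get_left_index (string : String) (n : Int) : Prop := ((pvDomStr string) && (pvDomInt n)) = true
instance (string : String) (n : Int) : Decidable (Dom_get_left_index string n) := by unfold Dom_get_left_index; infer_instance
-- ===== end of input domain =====

-- B replaces A's forward last-match accumulator loop by the loop-free slice computation len(string[:index].rstrip('0')) - 1; on a negative middle index with a '0' there and a non-zero prefix, A returns -1 (empty range) while B returns the intended last non-zero position of the prefix (stated as D_).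


-- ===== PORT A =====
-- index = int((n-1)/2): exact float division by 2 then truncation toward zero = Int.tdiv (exact for |n| ≤ 2^31)
def get_left_index (string : String) (n : Int) : Int :=
  let index := (n - 1).tdiv 2
  match PySem.Str.pyGet? string index with
  | none => 0  -- IndexError in Python; excluded by Pre_
  | some c =>
    if c ≠ '0' then index + 1
    else
      (PySem.List.pyRange 0 index 1).foldl
        (fun left_index i =>
          if (PySem.Str.pyGet? string i).getD '0' ≠ '0' then i else left_index)
        (-1)

-- ===== PORT B =====
-- s.rstrip('0') ported by hand (PySem has no single-char rstrip): drop the trailing '0's; exact for this call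
def pyRstripZeros (l : List Char) : List Char := (l.reverse.dropWhile (· == '0')).reverse

def get_left_index_alt (string : String) (n : Int) : Int :=
  let index := (n - 1).tdiv 2
  match PySem.Str.pyGet? string index with
  | none => 0  -- IndexError in Python; excluded by Pre_
  | some c =>
    if c ≠ '0' then index + 1
    else ((pyRstripZeros (PySem.Str.slice string none (some index)).toList).length : Int) - 1

-- ===== PRECONDITION & SPEC =====
-- Pre_ excludes exactly the inputs where string[int((n-1)/2)] raises IndexError in Python (both A and B raise there)
def Pre_get_left_index (string : String) (n : Int) : Prop :=
  PySem.Raise.InRange string.toList.length ((n - 1).tdiv 2)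
instance (string : String) (n : Int) : Decidable (Pre_get_left_index string n) := by
  unfold Pre_get_left_index; infer_instance
def pvWitness_get_left_index : String × Int := ("10001", 5)

-- When int((n-1)/2) is negative, string[index]=='0' and the prefix string[:index] has a non-zero char, A returns -1 (range(negative) is empty) although its own guard read the wrapped negative index; B returns the last non-zero position of that prefix, the intended value.
def D_get_left_index (string : String) (n : Int) : Prop :=
  (n - 1).tdiv 2 < 0 ∧
  PySem.Str.pyGet? string ((n - 1).tdiv 2) = some '0' ∧
  (string.toList.take ((string.toList.length : Int) + (n - 1).tdiv 2).toNat).any (· ≠ '0') = true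
instance (string : String) (n : Int) : Decidable (D_get_left_index string n) := by
  unfold D_get_left_index; infer_instance

def Spec_get_left_index (string : String) (n : Int) (out : Int) : Prop :=
  ¬ D_get_left_index string n → out = get_left_index_alt string n
instance (string : String) (n : Int) (out : Int) : Decidable (Spec_get_left_index string n out) := by unfold Spec_get_left_index; infer_instance

def pvDiffWitness_get_left_index : String × Int := ("10", -1)
def pvDiffWitnessOut_get_left_index : Int × Int := (-1, 0)

-- ===== CLAIM (what is proved, stated in full; the proofs are below) =====
def Claim_unchanged_get_left_index : Prop := ∀ (string : String) (n : Int), Dom_get_left_index string n → Pre_get_left_index string n → Spec_get_left_index string n (get_left_index string n)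
def Claim_changed_get_left_index : Prop := Dom_get_left_index (pvDiffWitness_get_left_index.1) (pvDiffWitness_get_left_index.2) ∧ Pre_get_left_index (pvDiffWitness_get_left_index.1) (pvDiffWitness_get_left_index.2) ∧ D_get_left_index (pvDiffWitness_get_left_index.1) (pvDiffWitness_get_left_index.2) ∧ get_left_index (pvDiffWitness_get_left_index.1) (pvDiffWitness_get_left_index.2) = pvDiffWitnessOut_get_left_index.1 ∧ get_left_index_alt (pvDiffWitness_get_left_index.1) (pvDiffWitness_get_left_index.2) = pvDiffWitnessOut_get_left_index.2 ∧ pvDiffWitnessOut_get_left_index.1 ≠ pvDiffWitnessOut_get_left_index.2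
def Claim_exact_get_left_index : Prop := ∀ (string : String) (n : Int), Dom_get_left_index string n → Pre_get_left_index string n → D_get_left_index string n → get_left_index string n ≠ get_left_index_alt string n

-- ===== LEMMAS AND PROOFS =====

-- A's last-match fold over range(k) equals "length of the k-prefix with trailing zeros stripped, minus 1"
theorem lastNZ_eq (l : List Char) (k : Nat) (hk : k ≤ l.length) :
    (PySem.List.pyRange 0 (k : Int) 1).foldl
      (fun left_index i => if (PySem.List.pyGet? l i).getD '0' ≠ '0' then i else left_index) (-1)
    = (((l.take k).reverse.dropWhile (· == '0')).length : Int) - 1 := by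
  induction k with
  | zero => simp [PySem.List.pyRange_one_eq_nil (le_refl 0)]
  | succ k ih =>
    have hklt : k < l.length := hk
    have hr : PySem.List.pyRange 0 ((k + 1 : Nat) : Int) 1
        = PySem.List.pyRange 0 (k : Int) 1 ++ [(k : Int)] := by
      push_cast
      exact PySem.List.pyRange_one_succ_right (by positivity)
    rw [hr, List.foldl_append, ih (le_of_lt hklt)]
    have hget : PySem.List.pyGet? l ((k : Nat) : Int) = some l[k] :=
      PySem.List.pyGet?_ofNat l k hklt
    have htake : l.take (k + 1) = l.take k ++ [l[k]] := by
      rw [List.take_succ]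
      simp [List.getElem?_eq_getElem hklt]
    rw [htake]
    simp only [List.foldl_cons, List.foldl_nil, hget, Option.getD_some,
      List.reverse_append, List.reverse_cons, List.reverse_nil, List.nil_append,
      List.singleton_append, List.dropWhile_cons]
    by_cases hc : l[k] = '0'
    · simp [hc]
    · simp [hc, List.length_take, Nat.min_eq_left (le_of_lt hklt)]

-- bridge lastNZ_eq to the String-level fold A's port performs
theorem lastNZ_eq' (string : String) (k : Nat) (hk : k ≤ string.toList.length) :
    (PySem.List.pyRange 0 (k : Int) 1).foldl
      (fun left_index i => if (PySem.Str.pyGet? string i).getD '0' ≠ '0' then i else left_index) (-1)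
    = (((string.toList.take k).reverse.dropWhile (· == '0')).length : Int) - 1 := by
  have hfun : (fun (left_index i : Int) => if (PySem.Str.pyGet? string i).getD '0' ≠ '0' then i else left_index)
      = (fun (left_index i : Int) => if (PySem.List.pyGet? string.toList i).getD '0' ≠ '0' then i else left_index) := by
    funext a i
    simp [PySem.Str.pyGet?_eq, PySem.Chars.pyGet?_eq_listPyGet?]
  rw [hfun]
  exact lastNZ_eq string.toList k hk

-- ===== VERDICT (by name: the statement is the Claim_ definition above) =====
theorem get_left_index_spec : Claim_unchanged_get_left_index := by
  intro string n _ hPre hnD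
  simp only [get_left_index, get_left_index_alt]
  set index := (n - 1).tdiv 2 with hidx
  have hsome : ∃ c, PySem.Str.pyGet? string index = some c := by
    cases h : PySem.Str.pyGet? string index with
    | none =>
      exfalso
      have := (PySem.List.pyGet?_eq_none_iff (xs := string.toList) (i := index)).mp (by simpa using h)
      exact this hPre
    | some c => exact ⟨c, rfl⟩
  obtain ⟨c, hc⟩ := hsome
  rw [hc]
  by_cases hc0 : c = '0'
  · subst hc0
    show (if ('0' : Char) ≠ '0' then index + 1
        else (PySem.List.pyRange 0 index 1).foldl
          (fun left_index i => if (PySem.Str.pyGet? string i).getD '0' ≠ '0' then i else left_index) (-1))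
      = (if ('0' : Char) ≠ '0' then index + 1
        else ((pyRstripZeros (PySem.Str.slice string none (some index)).toList).length : Int) - 1)
    rw [if_neg (show ¬('0' ≠ '0') from by simp), if_neg (show ¬('0' ≠ '0') from by simp)]
    by_cases hi : 0 ≤ index
    · -- nonnegative middle index: the main lemma applies with k = index.toNat
      have hk : index = ((index.toNat : Nat) : Int) := (Int.toNat_of_nonneg hi).symm
      have hlen : index < (string.toList.length : Int) := hPre.2
      have hkle : index.toNat ≤ string.toList.length := by omega
      have hslice : (PySem.Str.slice string none (some index)).toList
          = string.toList.take index.toNat := by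
        simp [PySem.List.slice_to string.toList hi]
      rw [hslice, hk, Int.toNat_natCast]
      simp only [pyRstripZeros, List.length_reverse]
      exact lastNZ_eq' string index.toNat hkle
    · -- negative middle index, outside D_: the prefix is all zeros on both sides
      push_neg at hi
      have hA : PySem.List.pyRange 0 index 1 = [] :=
        PySem.List.pyRange_one_eq_nil (le_of_lt hi)
      rw [hA]
      simp only [List.foldl_nil]
      -- B: string[:index] = take (len + index), all of whose chars are '0' by ¬ D_
      have hnany : ¬ (string.toList.take ((string.toList.length : Int) + index).toNat).any (· ≠ '0') = true := by
        intro hany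
        exact hnD ⟨hi, hc, hany⟩
      have hall : ∀ x ∈ string.toList.take ((string.toList.length : Int) + index).toNat, x = '0' := by
        intro x hx
        by_contra hne
        exact hnany (List.any_eq_true.mpr ⟨x, hx, by simpa using hne⟩)
      have hslice : (PySem.Str.slice string none (some index)).toList
          = string.toList.take ((string.toList.length : Int) + index).toNat := by
        have hklb : 0 < (-index).toNat := by omega
        have : PySem.List.slice string.toList none (some (-(((-index).toNat : Nat) : Int)))
            = string.toList.take (string.toList.length - (-index).toNat) :=
          PySem.List.slice_to_neg_natCast string.toList (-index).toNat hklb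
        have hidx2 : (-(((-index).toNat : Nat) : Int)) = index := by omega
        have hlen2 : string.toList.length - (-index).toNat
            = ((string.toList.length : Int) + index).toNat := by
          have hge : -(string.toList.length : Int) ≤ index := hPre.1
          omega
        simp only [hidx2, hlen2] at this
        simpa using this
      have hdw : ((string.toList.take ((string.toList.length : Int) + index).toNat).reverse.dropWhile (· == '0')) = [] := by
        rw [List.dropWhile_eq_nil_iff]
        intro x hx
        simpa using hall x (List.mem_reverse.mp hx)
      rw [hslice]
      simp only [pyRstripZeros]
      rw [hdw]
      simp
  · simp [hc0]

theorem get_left_index_changed : Claim_changed_get_left_index := by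
  unfold Claim_changed_get_left_index; decide

theorem get_left_index_tight : Claim_exact_get_left_index := by
  intro string n _ hPre hD
  obtain ⟨hi, hc, hany⟩ := hD
  simp only [get_left_index, get_left_index_alt]
  rw [hc]
  show (if ('0' : Char) ≠ '0' then (n - 1).tdiv 2 + 1
      else (PySem.List.pyRange 0 ((n - 1).tdiv 2) 1).foldl
        (fun left_index i => if (PySem.Str.pyGet? string i).getD '0' ≠ '0' then i else left_index) (-1))
    ≠ (if ('0' : Char) ≠ '0' then (n - 1).tdiv 2 + 1
      else ((pyRstripZeros (PySem.Str.slice string none (some ((n - 1).tdiv 2))).toList).length : Int) - 1)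
  rw [if_neg (show ¬('0' ≠ '0') from by simp), if_neg (show ¬('0' ≠ '0') from by simp)]
  rw [PySem.List.pyRange_one_eq_nil (le_of_lt hi)]
  simp only [List.foldl_nil]
  -- A = -1; B's stripped prefix is nonempty, so B ≥ 0
  have hslice : (PySem.Str.slice string none (some ((n - 1).tdiv 2))).toList
      = string.toList.take ((string.toList.length : Int) + (n - 1).tdiv 2).toNat := by
    have hklb : 0 < (-(n - 1).tdiv 2).toNat := by omega
    have := PySem.List.slice_to_neg_natCast string.toList (-(n - 1).tdiv 2).toNat hklb
    have hidx2 : (-(((-(n - 1).tdiv 2).toNat : Nat) : Int)) = (n - 1).tdiv 2 := by omega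
    have hlen2 : string.toList.length - (-(n - 1).tdiv 2).toNat
        = ((string.toList.length : Int) + (n - 1).tdiv 2).toNat := by
      have hge : -(string.toList.length : Int) ≤ (n - 1).tdiv 2 := hPre.1
      omega
    simp only [hidx2, hlen2] at this
    simpa using this
  rw [hslice]
  obtain ⟨x, hx, hxne⟩ := List.any_eq_true.mp hany
  have hne : ((string.toList.take ((string.toList.length : Int) + (n - 1).tdiv 2).toNat).reverse.dropWhile (· == '0')) ≠ [] := by
    rw [Ne, List.dropWhile_eq_nil_iff]
    push_neg
    exact ⟨x, List.mem_reverse.mpr hx, by simpa using hxne⟩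
  have hpos : 0 < ((string.toList.take ((string.toList.length : Int) + (n - 1).tdiv 2).toNat).reverse.dropWhile (· == '0')).length :=
    List.length_pos_iff.mpr hne
  simp only [pyRstripZeros, List.length_reverse]
  omega
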